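-- pv_equiv track=rewrite | github.com/TobyYang7/DMLR | main.py | _split_indices
-- ===== SOURCE A (Python) =====
-- def _split_indices(n_total: int, n_workers: int):
--     """Split [0, n_total) into n_workers nearly equal spans."""
--     n_workers = max(1, int(n_workers))
--     base = n_total // n_workers
--     rem = n_total % n_workers
--     spans = []
--     start = 0
--     for w in range(n_workers):
--         size = base + (1 if w < rem else 0)
--         end = start + size
--         spans.append((start, end))
--         start = end
--     return spans
-- ===== SOURCE B (Python) =====
-- def _split_indices(n_total: int, n_workers: int):
--     """Split [0, n_total) into n_workers nearly equal spans."""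
--     n_workers = max(1, int(n_workers))
--     base = n_total // n_workers
--     rem = n_total % n_workers
--     return [(w * base + min(w, rem), (w + 1) * base + min(w + 1, rem))
--             for w in range(n_workers)]
-- ===== Notes on version B (the rewrite author's own statement) =====
-- stated objective: alternative
-- what changed: Replaces the loop that threads a running start accumulator with a list comprehension computing each span in closed form from its worker index (w*base + min(w, rem)).
import Mathlib
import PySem

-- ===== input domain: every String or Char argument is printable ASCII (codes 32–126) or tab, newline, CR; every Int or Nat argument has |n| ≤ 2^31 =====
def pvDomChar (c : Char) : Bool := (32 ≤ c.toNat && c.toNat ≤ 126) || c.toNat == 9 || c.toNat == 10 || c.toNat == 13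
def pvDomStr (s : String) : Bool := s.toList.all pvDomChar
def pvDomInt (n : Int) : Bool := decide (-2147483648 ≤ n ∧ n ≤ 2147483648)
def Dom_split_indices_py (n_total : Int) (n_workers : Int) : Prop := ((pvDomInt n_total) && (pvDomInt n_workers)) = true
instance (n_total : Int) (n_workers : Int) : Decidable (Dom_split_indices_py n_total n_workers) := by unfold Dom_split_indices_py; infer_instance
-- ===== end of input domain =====

-- B replaces A's loop with a carried `start` accumulator by a closed-form span per worker index (alternative decomposition, same cost).

-- ===== PORT A =====
def split_indices_py (n_total : Int) (n_workers : Int) : List (Int × Int) :=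
  let nw := max 1 n_workers
  let base := PySem.Int.floordiv n_total nw
  let rem := PySem.Int.mod n_total nw
  let st := (PySem.List.pyRange 0 nw 1).foldl
    (fun (st : List (Int × Int) × Int) w =>
      let size := base + (if w < rem then 1 else 0)
      let e := st.2 + size
      (st.1 ++ [(st.2, e)], e)) ([], 0)
  st.1

-- ===== PORT B =====
def split_indices_py_alt (n_total : Int) (n_workers : Int) : List (Int × Int) :=
  let nw := max 1 n_workers
  let base := PySem.Int.floordiv n_total nw
  let rem := PySem.Int.mod n_total nw
  (PySem.List.pyRange 0 nw 1).map
    (fun w => (w * base + min w rem, (w + 1) * base + min (w + 1) rem))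

-- ===== PRECONDITION & SPEC =====
def Spec_split_indices_py (n_total : Int) (n_workers : Int) (out : List (Int × Int)) : Prop := out = split_indices_py_alt n_total n_workers
instance (n_total : Int) (n_workers : Int) (out : List (Int × Int)) : Decidable (Spec_split_indices_py n_total n_workers out) := by unfold Spec_split_indices_py; infer_instance

-- ===== CLAIM (what is proved, stated in full; the proofs are below) =====
def Claim_equal_split_indices_py : Prop := ∀ (n_total : Int) (n_workers : Int), Dom_split_indices_py n_total n_workers → Spec_split_indices_py n_total n_workers (split_indices_py n_total n_workers)

-- ===== LEMMAS AND PROOFS =====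

-- A's loop, run over range n, yields exactly B's closed-form spans (needs 0 ≤ rem).
theorem split_loop_closed (base rem : Int) (h : 0 ≤ rem) (n : Nat) :
    ((List.range n).map (fun (k : Nat) => (0:Int) + (k:Int))).foldl
      (fun (st : List (Int × Int) × Int) w =>
        (st.1 ++ [(st.2, st.2 + (base + (if w < rem then 1 else 0)))],
         st.2 + (base + (if w < rem then 1 else 0)))) ([], 0)
    = ((List.range n).map
         (fun (k : Nat) => ((k:Int) * base + min (k:Int) rem, ((k:Int) + 1) * base + min ((k:Int) + 1) rem)),
       (n:Int) * base + min (n:Int) rem) := by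
  induction n with
  | zero => simpa using h
  | succ m ih =>
      rw [List.range_succ, List.map_append, List.foldl_append, ih]
      simp only [List.map_append, List.map_cons, List.map_nil, List.foldl_cons, List.foldl_nil]
      have key : ((m:Int)) * base + min ((m:Int)) rem + (base + if (0:Int) + (m:Int) < rem then 1 else 0)
          = ((m:Int) + 1) * base + min ((m:Int) + 1) rem := by
        by_cases hc : rem ≤ (m:Int)
        · rw [if_neg (by omega), min_eq_right (by omega), min_eq_right (by omega)]; ring
        · rw [if_pos (by omega), min_eq_left (by omega), min_eq_left (by omega)]; ring
      rw [Prod.mk.injEq]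
      refine ⟨by rw [key], by rw [key]; push_cast; ring⟩

-- ===== VERDICT (by name: the statement is the Claim_ definition above) =====
theorem split_indices_py_spec : Claim_equal_split_indices_py := by
  intro n_total n_workers _
  unfold Spec_split_indices_py split_indices_py split_indices_py_alt
  have hnw : (0:Int) < max 1 n_workers := by
    have := le_max_left (1:Int) n_workers; omega
  have hrem : 0 ≤ PySem.Int.mod n_total (max 1 n_workers) :=
    PySem.Int.mod_nonneg _ hnw
  dsimp only
  rw [PySem.List.pyRange_one]
  have h0 : ((max 1 n_workers : Int) - 0).toNat = (max 1 n_workers).toNat := by omega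
  rw [h0]
  rw [split_loop_closed _ _ hrem]
  simp only [List.map_map]
  apply List.map_congr_left
  intro k _
  simp
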